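-- pv_equiv track=rewrite | github.com/SheikhAbdulRehman926/SARKS-IntelliLine-BOPET-FilmLine-KPI-Dashboard | App_updated_SARKS.py | detect_total_waste_col
-- ===== SOURCE A (Python) =====
-- from typing import Optional, Dict, Tuple, List
-- from typing import Optional
--
-- WB_TOTAL_COL_CANDIDATES = [
--     "Total Waste (Tons)", "Total Waste Tons", "Total Waste", "Waste Total (Tons)",
-- ]
--
-- def detect_total_waste_col(cols: List[str]) -> Optional[str]:
--     for c in cols:
--         if c.strip().lower() == "total waste (tons)":
--             return c
--     for c in cols:
--         cl = c.lower().strip()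
--         if any(k.lower() == cl for k in WB_TOTAL_COL_CANDIDATES):
--             return c
--         if ("total" in cl and "waste" in cl) and ("ton" in cl or "t" in cl):
--             return c
--     return None
-- ===== SOURCE B (Python) =====
-- from typing import Optional, List
--
-- def detect_total_waste_col(cols: List[str]) -> Optional[str]:
--     # one pass, two first-occurrence trackers; candidate list and "ton"/"t"
--     # clauses collapse to the substring test (every candidate contains both words)
--     exact = None
--     fuzzy = None
--     for c in cols:
--         cl = c.strip().lower()
--         if exact is None and cl == "total waste (tons)":
--             exact = c
--         if fuzzy is None and "total" in cl and "waste" in cl: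
--             fuzzy = c
--     return exact if exact is not None else fuzzy
-- ===== Notes on version B (the rewrite author's own statement) =====
-- stated objective: simpler
-- what changed: Replaces A's two sequential scans with one pass keeping two first-occurrence trackers (exact, fuzzy), and collapses the four-candidate list and the redundant 'ton'/'t' clause into the single test 'total' in cl and 'waste' in cl, which provably subsumes them.
import Mathlib
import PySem

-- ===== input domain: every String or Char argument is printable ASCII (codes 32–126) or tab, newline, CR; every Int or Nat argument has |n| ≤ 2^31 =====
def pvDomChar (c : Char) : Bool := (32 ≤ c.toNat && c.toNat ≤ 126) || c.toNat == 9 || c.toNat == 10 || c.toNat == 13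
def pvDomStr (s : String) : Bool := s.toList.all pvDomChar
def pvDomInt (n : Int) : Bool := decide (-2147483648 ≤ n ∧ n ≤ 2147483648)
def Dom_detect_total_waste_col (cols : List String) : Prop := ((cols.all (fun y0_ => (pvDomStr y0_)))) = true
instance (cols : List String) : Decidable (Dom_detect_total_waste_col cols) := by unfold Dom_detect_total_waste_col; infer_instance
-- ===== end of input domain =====

-- B folds A's two scans into one pass with two first-occurrence trackers and a simplified (provably equivalent) fuzzy test; objective: simpler.

-- ===== PORT A =====
def WB_TOTAL_COL_CANDIDATES : List String :=
  ["Total Waste (Tons)", "Total Waste Tons", "Total Waste", "Waste Total (Tons)"]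

-- first loop of A: first c with c.strip().lower() == "total waste (tons)"
def pvA_exact : List String → Option String
  | [] => none
  | c :: rest =>
      if PySem.Str.lower (PySem.Str.strip c) == "total waste (tons)" then some c
      else pvA_exact rest

-- second loop of A
def pvA_loose : List String → Option String
  | [] => none
  | c :: rest =>
      let cl := PySem.Str.strip (PySem.Str.lower c)
      if WB_TOTAL_COL_CANDIDATES.any (fun k => PySem.Str.lower k == cl) then some c
      else if (PySem.Str.isIn "total" cl && PySem.Str.isIn "waste" cl) &&
              (PySem.Str.isIn "ton" cl || PySem.Str.isIn "t" cl) then some c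
      else pvA_loose rest

def detect_total_waste_col (cols : List String) : Option String :=
  match pvA_exact cols with
  | some c => some c
  | none => pvA_loose cols

-- ===== PORT B =====
def pvB_step (st : Option String × Option String) (c : String) : Option String × Option String :=
  let cl := PySem.Str.lower (PySem.Str.strip c)
  ( if st.1.isNone && (cl == "total waste (tons)") then some c else st.1,
    if st.2.isNone && (PySem.Str.isIn "total" cl && PySem.Str.isIn "waste" cl) then some c else st.2 )

def detect_total_waste_col_alt (cols : List String) : Option String :=
  let st := cols.foldl pvB_step (none, none)
  match st.1 with
  | some c => some c
  | none => st.2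

-- ===== PRECONDITION & SPEC =====
def Spec_detect_total_waste_col (cols : List String) (out : Option String) : Prop := out = detect_total_waste_col_alt cols
instance (cols : List String) (out : Option String) : Decidable (Spec_detect_total_waste_col cols out) := by unfold Spec_detect_total_waste_col; infer_instance

-- ===== CLAIM (what is proved, stated in full; the proofs are below) =====
def Claim_equal_detect_total_waste_col : Prop := ∀ (cols : List String), Dom_detect_total_waste_col cols → Spec_detect_total_waste_col cols (detect_total_waste_col cols)

-- ===== LEMMAS AND PROOFS =====

-- a char with code in [65, 122] is not Python whitespace
theorem pv_isspace_false (m : Nat) (h1 : 65 ≤ m) (h2 : m ≤ 122) (d : Char)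
    (hd : d.toNat = m) : PySem.Chars.isspace d = false := by
  refine Bool.eq_false_iff.mpr ?_
  intro hcontra
  simp only [PySem.Chars.isspace, hd, Bool.or_eq_true, Bool.and_eq_true,
    decide_eq_true_eq] at hcontra
  omega

-- lowercasing a char does not change whether it is whitespace
theorem pv_isspace_lowerChar (c : Char) :
    PySem.Chars.isspace (PySem.Chars.lowerChar c) = PySem.Chars.isspace c := by
  by_cases h : PySem.Chars.isupper c = true
  · have hb : 65 ≤ c.toNat ∧ c.toNat ≤ 90 := by
      simp only [PySem.Chars.isupper, Bool.and_eq_true, decide_eq_true_eq] at h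
      obtain ⟨h1, h2⟩ := h
      rw [Char.le_def] at h1 h2
      exact ⟨h1, h2⟩
    have ht : (Char.ofNat (c.toNat + 32)).toNat = c.toNat + 32 := by
      rw [Char.toNat_ofNat, if_pos (Or.inl (by omega))]
    simp only [PySem.Chars.lowerChar, h, if_true]
    rw [pv_isspace_false (c.toNat + 32) (by omega) (by omega) _ ht,
      pv_isspace_false c.toNat hb.1 (by omega) c rfl]
  · simp [PySem.Chars.lowerChar, h]

-- strip and lower commute
theorem pv_lower_strip (s : String) :
    PySem.Str.lower (PySem.Str.strip s) = PySem.Str.strip (PySem.Str.lower s) := by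
  simp only [PySem.Str.lower, PySem.Str.strip, String.toList_ofList]
  congr 1
  simp only [PySem.Chars.lower, PySem.Chars.strip, PySem.Chars.lstrip, PySem.Chars.rstrip]
  have hp : (PySem.Chars.isspace ∘ PySem.Chars.lowerChar) = PySem.Chars.isspace := by
    funext c; exact pv_isspace_lowerChar c
  rw [List.dropWhile_map, hp, ← List.map_reverse, List.dropWhile_map, hp, List.map_reverse]

-- "total" a substring implies "t" a substring
theorem pv_t_of_total (cl : String) (h : PySem.Str.isIn "total" cl = true) :
    PySem.Str.isIn "t" cl = true := by
  rw [PySem.Str.isIn_iff_infix] at h ⊢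
  exact List.IsInfix.trans (by decide) h

-- A's loose condition on cl equals B's condition on cl
theorem pv_loose_eq (cl : String) :
    (WB_TOTAL_COL_CANDIDATES.any (fun k => PySem.Str.lower k == cl) ||
      ((PySem.Str.isIn "total" cl && PySem.Str.isIn "waste" cl) &&
       (PySem.Str.isIn "ton" cl || PySem.Str.isIn "t" cl)))
    = (PySem.Str.isIn "total" cl && PySem.Str.isIn "waste" cl) := by
  by_cases hc : ∃ k ∈ WB_TOTAL_COL_CANDIDATES, PySem.Str.lower k = cl
  · obtain ⟨k, hk, he⟩ := hc
    subst he
    simp only [WB_TOTAL_COL_CANDIDATES, List.mem_cons, List.not_mem_nil, or_false] at hk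
    rcases hk with rfl | rfl | rfl | rfl <;> decide
  · have hany : WB_TOTAL_COL_CANDIDATES.any (fun k => PySem.Str.lower k == cl) = false := by
      refine Bool.eq_false_iff.mpr fun hcontra => ?_
      obtain ⟨k, hk, hbeq⟩ := List.any_eq_true.mp hcontra
      exact hc ⟨k, hk, eq_of_beq hbeq⟩
    rw [hany, Bool.false_or]
    cases hcase : (PySem.Str.isIn "total" cl && PySem.Str.isIn "waste" cl) with
    | false => rw [Bool.false_and]
    | true =>
        have htotal : PySem.Str.isIn "total" cl = true := by
          rcases Bool.and_eq_true_iff.mp hcase with ⟨h, _⟩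
          exact h
        rw [Bool.true_and, pv_t_of_total cl htotal, Bool.or_true]

-- B's fuzzy tracker, as a first-match scan
def pvB_fuzzy : List String → Option String
  | [] => none
  | c :: rest =>
      let cl := PySem.Str.lower (PySem.Str.strip c)
      if PySem.Str.isIn "total" cl && PySem.Str.isIn "waste" cl then some c
      else pvB_fuzzy rest

-- the fold computes the two first-match scans
theorem pv_fold_eq (l : List String) (e f : Option String) :
    l.foldl pvB_step (e, f)
      = (e.orElse (fun _ => pvA_exact l), f.orElse (fun _ => pvB_fuzzy l)) := by
  induction l generalizing e f with
  | nil => cases e <;> cases f <;> rfl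
  | cons c rest ih =>
      rw [List.foldl_cons]
      rcases e with _ | a <;> rcases f with _ | b
      · have hst : pvB_step (none, none) c =
            ((if PySem.Str.lower (PySem.Str.strip c) == "total waste (tons)" then some c
              else none),
             (if PySem.Str.isIn "total" (PySem.Str.lower (PySem.Str.strip c)) &&
                 PySem.Str.isIn "waste" (PySem.Str.lower (PySem.Str.strip c)) then some c
              else none)) := by simp [pvB_step]
        rw [hst, ih]
        simp only [pvA_exact, pvB_fuzzy]
        by_cases h1 : (PySem.Str.lower (PySem.Str.strip c) == "total waste (tons)") = true <;>
          by_cases hB : (PySem.Str.isIn "total" (PySem.Str.lower (PySem.Str.strip c)) &&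
            PySem.Str.isIn "waste" (PySem.Str.lower (PySem.Str.strip c))) = true
        · rw [if_pos h1, if_pos hB, if_pos h1, if_pos hB]
          simp only [Option.orElse]
        · rw [if_pos h1, if_neg hB, if_pos h1, if_neg hB]
          simp only [Option.orElse]
        · rw [if_neg h1, if_pos hB, if_neg h1, if_pos hB]
          simp only [Option.orElse]
        · rw [if_neg h1, if_neg hB, if_neg h1, if_neg hB]
      · have hst : pvB_step (none, some b) c =
            ((if PySem.Str.lower (PySem.Str.strip c) == "total waste (tons)" then some c
              else none), some b) := by simp [pvB_step]
        rw [hst, ih]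
        simp only [pvA_exact]
        by_cases h1 : (PySem.Str.lower (PySem.Str.strip c) == "total waste (tons)") = true
        · rw [if_pos h1, if_pos h1]
          simp only [Option.orElse]
        · rw [if_neg h1, if_neg h1]
          simp only [Option.orElse]
      · have hst : pvB_step (some a, none) c =
            (some a,
             (if PySem.Str.isIn "total" (PySem.Str.lower (PySem.Str.strip c)) &&
                 PySem.Str.isIn "waste" (PySem.Str.lower (PySem.Str.strip c)) then some c
              else none)) := by simp [pvB_step]
        rw [hst, ih]
        simp only [pvB_fuzzy]
        by_cases hB : (PySem.Str.isIn "total" (PySem.Str.lower (PySem.Str.strip c)) &&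
            PySem.Str.isIn "waste" (PySem.Str.lower (PySem.Str.strip c))) = true
        · rw [if_pos hB, if_pos hB]
          simp only [Option.orElse]
        · rw [if_neg hB, if_neg hB]
          simp only [Option.orElse]
      · have hst : pvB_step (some a, some b) c = (some a, some b) := by simp [pvB_step]
        rw [hst, ih]
        simp only [Option.orElse]

-- pointwise, A's loose scan is B's fuzzy scan
theorem pv_loose_eq_fuzzy (l : List String) : pvA_loose l = pvB_fuzzy l := by
  induction l with
  | nil => rfl
  | cons c rest ih =>
      simp only [pvA_loose, pvB_fuzzy, ← pv_lower_strip c]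
      have hkey := pv_loose_eq (PySem.Str.lower (PySem.Str.strip c))
      by_cases h1 : (WB_TOTAL_COL_CANDIDATES.any
          (fun k => PySem.Str.lower k == PySem.Str.lower (PySem.Str.strip c))) = true
      · have hB : (PySem.Str.isIn "total" (PySem.Str.lower (PySem.Str.strip c)) &&
            PySem.Str.isIn "waste" (PySem.Str.lower (PySem.Str.strip c))) = true := by
          rw [h1, Bool.true_or] at hkey
          exact hkey.symm
        rw [if_pos h1, if_pos hB]
      · have hsame : ((PySem.Str.isIn "total" (PySem.Str.lower (PySem.Str.strip c)) &&
              PySem.Str.isIn "waste" (PySem.Str.lower (PySem.Str.strip c))) &&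
            (PySem.Str.isIn "ton" (PySem.Str.lower (PySem.Str.strip c)) ||
              PySem.Str.isIn "t" (PySem.Str.lower (PySem.Str.strip c))))
            = (PySem.Str.isIn "total" (PySem.Str.lower (PySem.Str.strip c)) &&
              PySem.Str.isIn "waste" (PySem.Str.lower (PySem.Str.strip c))) := by
          rw [Bool.eq_false_iff.mpr h1, Bool.false_or] at hkey
          exact hkey
        rw [if_neg h1]
        by_cases hB : (PySem.Str.isIn "total" (PySem.Str.lower (PySem.Str.strip c)) &&
            PySem.Str.isIn "waste" (PySem.Str.lower (PySem.Str.strip c))) = true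
        · rw [if_pos (hsame.trans hB), if_pos hB]
        · rw [if_neg (fun hcon => hB (hsame.symm.trans hcon)), if_neg hB, ih]

-- ===== VERDICT (by name: the statement is the Claim_ definition above) =====
theorem detect_total_waste_col_spec : Claim_equal_detect_total_waste_col := by
  intro cols _
  unfold Spec_detect_total_waste_col detect_total_waste_col detect_total_waste_col_alt
  rw [pv_fold_eq cols none none, ← pv_loose_eq_fuzzy]
  rfl
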